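-- pv_equiv track=rewrite | github.com/981377660LMT/algorithm-study | 16_滑动窗口/k重复字符子串词频统计/不完全包含target的子数组个数.py | solve
-- ===== SOURCE A (Python) =====
-- from collections import Counter
--
-- def solve(nums, target):
--     if not target:
--         # every sublist contains every number in target, so the answer is zero
--         return 0
--
--     target = set(target)
--     # `counter` will count elements in `nums[i:j]` that are in `target`
--     counter = Counter()
--     n = len(nums)
--     left = 0
--     res = 0
--     for right in range(n):
--         if nums[right] in target:
--             counter[nums[right]] += 1
--         # advance `i` until `nums[i:j+1]` satisfies the condition
--         # that not every number in `target` is present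
--         while len(counter) == len(target):
--             if nums[left] in target:
--                 counter[nums[left]] -= 1
--                 if not counter[nums[left]]:
--                     del counter[nums[left]]
--             left += 1
--         res += right - left + 1
--         res %= int(1e9 + 7)
--     return res
-- ===== SOURCE B (Python) =====
-- def solve(nums, target):
--     # Brute force over start indices: for each start i, walk right until the
--     # window first contains every distinct target value, counting the
--     # incomplete windows; the first-completion cut-off is correct because a
--     # window that contains all target values keeps containing them as it grows.
--     if not target:
--         return 0
--     need = set(target)
--     n = len(nums)
--     res = 0
--     for i in range(n):
--         seen = set()
--         for x in nums[i:]: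
--             if x in need:
--                 seen.add(x)
--             if len(seen) == len(need):
--                 break
--             res += 1
--     return res % (10 ** 9 + 7)
-- ===== Notes on version B (the rewrite author's own statement) =====
-- stated objective: alternative
-- what changed: Replaced the single-pass sliding window with a Counter and incremental shrinking by a direct per-start scan: for each start index, grow the window and count it until it first contains every distinct target value (a seen-set with an early break), taking the modulus once at the end instead of every iteration.
import Mathlib
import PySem

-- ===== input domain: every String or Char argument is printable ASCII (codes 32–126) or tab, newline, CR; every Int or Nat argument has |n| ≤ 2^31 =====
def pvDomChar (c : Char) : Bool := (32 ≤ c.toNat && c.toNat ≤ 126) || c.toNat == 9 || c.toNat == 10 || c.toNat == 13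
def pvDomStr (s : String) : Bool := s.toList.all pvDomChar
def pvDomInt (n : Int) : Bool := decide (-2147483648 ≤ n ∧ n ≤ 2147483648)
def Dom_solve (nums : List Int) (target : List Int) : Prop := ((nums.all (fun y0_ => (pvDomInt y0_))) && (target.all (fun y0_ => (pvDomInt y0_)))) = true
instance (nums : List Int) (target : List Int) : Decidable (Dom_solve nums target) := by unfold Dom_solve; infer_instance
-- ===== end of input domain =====

-- B replaces A's single-pass sliding window + Counter by a per-start scan with a
-- seen-set and an early break at first completion (alternative decomposition,
-- same return value; worst-case quadratic instead of linear).

-- ===== PORT A =====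
-- the inner `while len(counter) == len(target)` loop; fuel only makes the same
-- computation total (supplied as nums.length + 1, never exhausted), and the
-- `none` branch of pyGet? is Python's IndexError, which A never reaches
def solveShrink (nums : List Int) (tset : List Int) : Nat → PySem.Dict Int Int → Nat → PySem.Dict Int Int × Nat
  | 0, d, left => (d, left)
  | fuel + 1, d, left =>
    if d.size = tset.length then
      match PySem.List.pyGet? nums (left : Int) with
      | none => (d, left)
      | some x =>
        let d1 :=
          if tset.contains x then
            let d2 := d.modify x 0 (· - 1)
            if d2.getD x 0 = 0 then d2.erase x else d2
          else d
        solveShrink nums tset fuel d1 (left + 1)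
    else (d, left)

-- one iteration of `for right in range(n)`: state is (counter, left, res)
def solveStep (nums : List Int) (tset : List Int) (st : PySem.Dict Int Int × Nat × Int) (right : Nat) : PySem.Dict Int Int × Nat × Int :=
  let d :=
    match PySem.List.pyGet? nums (right : Int) with
    | none => st.1
    | some x => if tset.contains x then st.1.modify x 0 (· + 1) else st.1
  let p := solveShrink nums tset (nums.length + 1) d st.2.1
  (p.1, p.2, PySem.Int.mod (st.2.2 + ((right : Int) - (p.2 : Int) + 1)) 1000000007)

def solve (nums : List Int) (target : List Int) : Int :=
  if target.isEmpty then 0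
  else
    let tset := PySem.Set.ofList target
    ((List.range nums.length).foldl (solveStep nums tset) (PySem.Dict.empty, 0, 0)).2.2

-- ===== PORT B =====
-- inner `for x in nums[i:]` with the break at first completion
def solveAltInner (need : PySem.Set Int) : List Int → PySem.Set Int → Int → Int
  | [], _, res => res
  | x :: rest, seen, res =>
    let seen' := if need.contains x then seen.add x else seen
    if seen'.length = need.length then res
    else solveAltInner need rest seen' (res + 1)

def solve_alt (nums : List Int) (target : List Int) : Int :=
  if target.isEmpty then 0
  else
    let need := PySem.Set.ofList target
    PySem.Int.mod
      ((List.range nums.length).foldl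
        (fun res i => solveAltInner need (nums.drop i) PySem.Set.empty res) 0)
      1000000007

-- ===== PRECONDITION & SPEC =====
def Spec_solve (nums : List Int) (target : List Int) (out : Int) : Prop := out = solve_alt nums target
instance (nums : List Int) (target : List Int) (out : Int) : Decidable (Spec_solve nums target out) := by unfold Spec_solve; infer_instance

-- ===== CLAIM (what is proved, stated in full; the proofs are below) =====
def Claim_equal_solve : Prop := ∀ (nums : List Int) (target : List Int), Dom_solve nums target → Spec_solve nums target (solve nums target)

-- ===== LEMMAS AND PROOFS =====

-- nums[l:e] (0 ≤ l ≤ e): the window the two programs reason about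
def winI (nums : List Int) (l e : Nat) : List Int := (nums.take e).drop l

-- the window nums[l:e] contains every element of tset
abbrev complW (tset nums : List Int) (l e : Nat) : Prop := ∀ x ∈ tset, x ∈ winI nums l e

-- number of incomplete subarrays ending at index r (A's per-iteration addend)
def cntA (tset nums : List Int) (r : Nat) : Nat :=
  (List.range (r + 1)).countP (fun l => !decide (complW tset nums l (r + 1)))

-- number of incomplete subarrays starting at index i (B's per-iteration addend)
def cntB (tset nums : List Int) (i : Nat) : Nat :=
  (List.range (nums.length - i)).countP (fun t => !decide (complW tset nums i (i + t + 1)))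

-- the counter represents exactly the multiset of tset-elements of the window w
def InvD (tset : List Int) (d : PySem.Dict Int Int) (w : List Int) : Prop :=
  d.keys.Nodup ∧ ∀ x : Int, d.get? x = if x ∈ tset ∧ 0 < w.count x then some (w.count x : Int) else none

theorem winI_append (nums : List Int) (l r : Nat) (hlr : l ≤ r) (hr : r < nums.length) :
    winI nums l (r + 1) = winI nums l r ++ [nums[r]] := by
  unfold winI
  rw [List.take_add_one, List.getElem?_eq_getElem hr]
  simp only [Option.toList_some]
  rw [List.drop_append_of_le_length (by simp; omega)]

theorem winI_nil (nums : List Int) (l e : Nat) (h : e ≤ l ∨ nums.length ≤ l) :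
    winI nums l e = [] := by
  unfold winI
  apply List.drop_eq_nil_of_le
  simp only [List.length_take]
  omega

theorem winI_cons (nums : List Int) (l e : Nat) (hl : l < e) (hln : l < nums.length) :
    winI nums l e = nums[l] :: winI nums (l + 1) e := by
  unfold winI
  rw [List.drop_eq_getElem_cons (by simp; omega), List.getElem_take]

theorem complW_anti_left (tset nums : List Int) (l l' e : Nat) (h : l ≤ l') :
    complW tset nums l' e → complW tset nums l e := by
  intro hc x hx
  have := hc x hx
  unfold winI at *
  have hdd : (nums.take e).drop l' = ((nums.take e).drop l).drop (l' - l) := by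
    rw [List.drop_drop]; congr 1; omega
  rw [hdd] at this
  exact List.drop_subset _ _ this

theorem complW_mono_right (tset nums : List Int) (l e e' : Nat) (h : e ≤ e') :
    complW tset nums l e → complW tset nums l e' := by
  intro hc x hx
  have hmem := hc x hx
  unfold winI at *
  obtain ⟨t, hpref⟩ : ∃ t, nums.take e' = nums.take e ++ t := by
    have h1 : nums.take e = (nums.take e').take e := by
      rw [List.take_take]; congr 1; omega
    exact ⟨(nums.take e').drop e, by rw [h1, List.take_append_drop]⟩
  rw [hpref, List.drop_append]
  exact List.mem_append_left _ hmem

theorem not_complW_nil (tset nums : List Int) (l e : Nat) (ht : tset ≠ [])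
    (h : e ≤ l ∨ nums.length ≤ l) : ¬ complW tset nums l e := by
  intro hc
  obtain ⟨x, hx⟩ : ∃ x, x ∈ tset := by
    cases tset with
    | nil => exact absurd rfl ht
    | cons a t => exact ⟨a, List.mem_cons_self⟩
  have := hc x hx
  rw [winI_nil nums l e h] at this
  exact List.not_mem_nil this

-- two nodup lists, one contained in the other: equal lengths ↔ equal membership
theorem nodup_len_eq_iff (s t : List Int) (hs : s.Nodup) (ht : t.Nodup)
    (hsub : ∀ x ∈ s, x ∈ t) : s.length = t.length ↔ ∀ x ∈ t, x ∈ s := by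
  constructor
  · intro hlen x hx
    have hperm : s.Perm t :=
      (hs.subperm hsub).perm_of_length_le (le_of_eq hlen.symm)
    exact hperm.mem_iff.2 hx
  · intro hall
    have h1 : s.length ≤ t.length := (hs.subperm hsub).length_le
    have h2 : t.length ≤ s.length := (ht.subperm hall).length_le
    omega

theorem get?_erase (d : PySem.Dict Int Int) (k k' : Int) :
    (d.erase k).get? k' = if k' = k then none else d.get? k' := by
  obtain ⟨items⟩ := d
  simp only [PySem.Dict.get?, PySem.Dict.erase]
  induction items with
  | nil => simp
  | cons p rest ih =>
    by_cases hpk : p.1 = k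
    · have hf : List.filter (fun q => !q.1 == k) (p :: rest) =
          List.filter (fun q => !q.1 == k) rest := by
        simp [hpk]
      rw [hf, ih]
      by_cases hkk : k' = k
      · simp [hkk]
      · have h2 : (p.1 == k') = false := by
          simp only [beq_eq_false_iff_ne, ne_eq]
          intro h; exact hkk (h.symm.trans hpk)
        simp [hkk, h2]
    · have hf : List.filter (fun q => !q.1 == k) (p :: rest) =
          p :: List.filter (fun q => !q.1 == k) rest := by
        simp [hpk]
      rw [hf]
      by_cases hpk' : p.1 = k'
      · have hkk : ¬ k' = k := fun h => hpk (hpk'.trans h)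
        simp [hpk', hkk]
      · have h2 : (p.1 == k') = false := by simp [hpk']
        simp only [List.find?_cons, h2]
        exact ih

theorem nodup_keys_erase (d : PySem.Dict Int Int) (k : Int) (h : d.keys.Nodup) :
    (d.erase k).keys.Nodup := by
  have hsub : (d.erase k).items.Sublist d.items := by
    simp only [PySem.Dict.erase]
    exact List.filter_sublist
  exact List.Nodup.sublist (hsub.map _) h

theorem InvD_empty (tset : List Int) : InvD tset PySem.Dict.empty [] := by
  refine ⟨PySem.Dict.nodup_keys_empty, fun x => ?_⟩
  simp [PySem.Dict.get?_empty]

theorem InvD_size (tset : List Int) (d : PySem.Dict Int Int) (w : List Int)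
    (ht : tset.Nodup) (h : InvD tset d w) :
    (d.size = tset.length ↔ ∀ x ∈ tset, x ∈ w) := by
  have hsize : d.size = d.keys.length := by
    simp [PySem.Dict.size, PySem.Dict.keys]
  have hmem : ∀ y : Int, y ∈ d.keys ↔ (y ∈ tset ∧ 0 < w.count y) := by
    intro y
    rw [← not_iff_not, ← PySem.Dict.get?_eq_none_iff_not_mem_keys, h.2 y]
    by_cases hc : y ∈ tset ∧ 0 < w.count y <;> simp [hc]
  rw [hsize,
    nodup_len_eq_iff d.keys tset h.1 ht (fun x hx => ((hmem x).1 hx).1)]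
  constructor
  · intro hall x hx
    exact List.count_pos_iff.1 ((hmem x).1 (hall x hx)).2
  · intro hall x hx
    exact (hmem x).2 ⟨hx, List.count_pos_iff.2 (hall x hx)⟩

theorem InvD_extend (tset : List Int) (d : PySem.Dict Int Int) (w : List Int) (x : Int)
    (h : InvD tset d w) :
    InvD tset (if tset.contains x then d.modify x 0 (· + 1) else d) (w ++ [x]) := by
  obtain ⟨hnd, hget⟩ := h
  by_cases hx : x ∈ tset
  · have hcx : tset.contains x = true := by simpa using hx
    rw [if_pos hcx]
    have hgd : d.getD x 0 = (w.count x : Int) := by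
      rw [PySem.Dict.getD_eq_get?_getD, hget x]
      by_cases hc : 0 < w.count x
      · simp [hx, hc]
      · have h0 : w.count x = 0 := by omega
        simp [hx, h0]
    refine ⟨?_, fun y => ?_⟩
    · simpa [PySem.Dict.modify] using PySem.Dict.nodup_keys_insert _ _ _ hnd
    · simp only [PySem.Dict.modify]
      rw [PySem.Dict.get?_insert]
      by_cases hyx : y = x
      · subst hyx
        rw [if_pos rfl, hgd]
        have hcnt : (w ++ [y]).count y = w.count y + 1 := by
          simp [List.count_append]
        rw [hcnt, if_pos ⟨hx, by omega⟩]
        congr 1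
      · rw [if_neg hyx, hget y]
        have hcnt : (w ++ [x]).count y = w.count y := by
          simp [List.count_append, Ne.symm hyx]
        rw [hcnt]
  · have hcx : tset.contains x = false := by simpa using hx
    rw [if_neg (by simpa using hx)]
    refine ⟨hnd, fun y => ?_⟩
    rw [hget y]
    by_cases hyt : y ∈ tset
    · have hyx : y ≠ x := fun hh => hx (hh ▸ hyt)
      have hcnt : (w ++ [x]).count y = w.count y := by
        simp [List.count_append, Ne.symm hyx]
      rw [hcnt]
    · simp [hyt]

theorem InvD_remove (tset : List Int) (d : PySem.Dict Int Int) (w : List Int) (x : Int)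
    (h : InvD tset d (x :: w)) :
    InvD tset
      (if tset.contains x then
        (if (d.modify x 0 (· - 1)).getD x 0 = 0 then (d.modify x 0 (· - 1)).erase x
         else d.modify x 0 (· - 1))
       else d) w := by
  obtain ⟨hnd, hget⟩ := h
  by_cases hx : x ∈ tset
  · have hcx : tset.contains x = true := by simpa using hx
    rw [if_pos hcx]
    have hcxw : (x :: w).count x = w.count x + 1 := by
      simp
    have hgd : d.getD x 0 = ((x :: w).count x : Int) := by
      rw [PySem.Dict.getD_eq_get?_getD, hget x]
      simp [hx, hcxw]
    have hd2get : ∀ y : Int, (d.modify x 0 (· - 1)).get? y =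
        if y = x then some ((w.count x : Int)) else d.get? y := by
      intro y
      simp only [PySem.Dict.modify]
      rw [PySem.Dict.get?_insert]
      by_cases hyx : y = x
      · subst hyx
        rw [if_pos rfl, if_pos rfl, hgd]
        congr 1
        rw [hcxw]
        push_cast
        ring
      · rw [if_neg hyx, if_neg hyx]
    have hd2gd : (d.modify x 0 (· - 1)).getD x 0 = (w.count x : Int) := by
      rw [PySem.Dict.getD_eq_get?_getD, hd2get x]
      simp
    have hd2nd : (d.modify x 0 (· - 1)).keys.Nodup := by
      simpa [PySem.Dict.modify] using PySem.Dict.nodup_keys_insert _ _ _ hnd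
    by_cases hz : (d.modify x 0 (· - 1)).getD x 0 = 0
    · rw [if_pos hz]
      have hw0 : w.count x = 0 := by
        rw [hd2gd] at hz
        exact_mod_cast hz
      refine ⟨nodup_keys_erase _ _ hd2nd, fun y => ?_⟩
      rw [get?_erase]
      by_cases hyx : y = x
      · subst hyx
        rw [if_pos rfl]
        symm
        rw [if_neg]
        simp [hw0]
      · rw [if_neg hyx, hd2get y, if_neg hyx, hget y]
        have hcnt : (x :: w).count y = w.count y := by
          simp [Ne.symm hyx]
        rw [hcnt]
    · rw [if_neg hz]
      have hw0 : w.count x ≠ 0 := by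
        intro h0
        apply hz
        rw [hd2gd, h0]
        norm_num
      refine ⟨hd2nd, fun y => ?_⟩
      rw [hd2get y]
      by_cases hyx : y = x
      · subst hyx
        rw [if_pos rfl]
        symm
        rw [if_pos ⟨hx, by omega⟩]
      · rw [if_neg hyx, hget y]
        have hcnt : (x :: w).count y = w.count y := by
          simp [Ne.symm hyx]
        rw [hcnt]
  · have hcx : tset.contains x = false := by simpa using hx
    rw [if_neg (by simpa using hx)]
    refine ⟨hnd, fun y => ?_⟩
    rw [hget y]
    by_cases hyt : y ∈ tset
    · have hyx : y ≠ x := fun hh => hx (hh ▸ hyt)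
      have hcnt : (x :: w).count y = w.count y := by
        simp [Ne.symm hyx]
      rw [hcnt]
    · simp [hyt]

-- the while loop ends exactly at the first incomplete window start
theorem solveShrink_spec (nums tset : List Int) (r : Nat) (ht : tset.Nodup) (hne : tset ≠ [])
    (hr : r < nums.length) :
    ∀ (fuel : Nat) (d : PySem.Dict Int Int) (left : Nat),
      InvD tset d (winI nums left (r + 1)) →
      (∀ l < left, complW tset nums l (r + 1)) →
      left ≤ r + 1 → r + 2 ≤ fuel + left →
      let p := solveShrink nums tset fuel d left
      InvD tset p.1 (winI nums p.2 (r + 1)) ∧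
      (∀ l < p.2, complW tset nums l (r + 1)) ∧
      ¬ complW tset nums p.2 (r + 1) ∧ p.2 ≤ r + 1 := by
  intro fuel
  induction fuel with
  | zero => intro d left _ _ h3 h4; omega
  | succ fuel ih =>
    intro d left h1 h2 h3 h4
    by_cases hsz : d.size = tset.length
    · have hc : complW tset nums left (r + 1) := by
        intro y hy
        exact ((InvD_size tset d _ ht h1).1 hsz) y hy
      have hlt : left ≤ r := by
        rcases Nat.lt_or_ge left (r + 1) with hca | hca
        · omega
        · exact absurd hc (not_complW_nil tset nums left (r + 1) hne (Or.inl (by omega)))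
      have hln : left < nums.length := by omega
      have hpg : PySem.List.pyGet? nums (left : Int) = some nums[left] := by
        rw [PySem.List.pyGet?_natCast, List.getElem?_eq_getElem hln]
      have hwin : winI nums left (r + 1) = nums[left] :: winI nums (left + 1) (r + 1) :=
        winI_cons nums left (r + 1) (by omega) hln
      rw [hwin] at h1
      have h1' := InvD_remove tset d (winI nums (left + 1) (r + 1)) nums[left] h1
      have hstep : solveShrink nums tset (fuel + 1) d left =
          solveShrink nums tset fuel
            (if tset.contains nums[left] then
              (if (d.modify nums[left] 0 (· - 1)).getD nums[left] 0 = 0 then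
                (d.modify nums[left] 0 (· - 1)).erase nums[left]
               else d.modify nums[left] 0 (· - 1))
             else d) (left + 1) := by
        simp only [solveShrink, if_pos hsz, hpg]
      rw [hstep]
      exact ih _ (left + 1) h1'
        (fun l hl => complW_anti_left tset nums l left (r + 1) (by omega) hc)
        (by omega) (by omega)
    · have hret : solveShrink nums tset (fuel + 1) d left = (d, left) := by
        simp only [solveShrink, if_neg hsz]
      rw [hret]
      refine ⟨h1, h2, ?_, h3⟩
      intro hc
      exact hsz ((InvD_size tset d _ ht h1).2 (fun y hy => hc y hy))

theorem countP_range_ge (k L : Nat) :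
    (List.range k).countP (fun l => decide (L ≤ l)) = k - L := by
  induction k with
  | zero => simp
  | succ k ih =>
    rw [List.range_succ, List.countP_append, ih]
    by_cases hk : L ≤ k <;> simp [hk] <;> omega

theorem cntA_frontier (tset nums : List Int) (r L : Nat)
    (h1 : ∀ l < L, complW tset nums l (r + 1)) (h2 : ¬ complW tset nums L (r + 1)) :
    cntA tset nums r = r + 1 - L := by
  unfold cntA
  rw [List.countP_congr (q := fun l => decide (L ≤ l))]
  · exact countP_range_ge (r + 1) L
  · intro l _
    simp only [Bool.not_eq_eq_eq_not, Bool.not_true, decide_eq_false_iff_not,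
      decide_eq_true_eq]
    constructor
    · intro hnc
      by_contra hlt
      exact hnc (h1 l (by omega))
    · intro hLl hcl
      exact h2 (complW_anti_left tset nums L l (r + 1) hLl hcl)

theorem modAdd (a b : Int) :
    PySem.Int.mod (PySem.Int.mod a 1000000007 + b) 1000000007 = PySem.Int.mod (a + b) 1000000007 := by
  rw [PySem.Int.mod_eq_emod_of_pos (by norm_num), PySem.Int.mod_eq_emod_of_pos (by norm_num),
    PySem.Int.mod_eq_emod_of_pos (by norm_num)]
  conv_lhs => rw [Int.add_emod, Int.emod_emod_of_dvd a dvd_rfl]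
  rw [← Int.add_emod]

-- invariant of A's main fold
def GoodA (tset nums : List Int) (r : Nat) (st : PySem.Dict Int Int × Nat × Int) : Prop :=
  InvD tset st.1 (winI nums st.2.1 r) ∧ (∀ l < st.2.1, complW tset nums l r) ∧ st.2.1 ≤ r ∧
  st.2.2 = PySem.Int.mod ((∑ r' ∈ Finset.range r, cntA tset nums r' : Nat) : Int) 1000000007

theorem foldA_good (nums tset : List Int) (ht : tset.Nodup) (hne : tset ≠ []) :
    ∀ r, r ≤ nums.length →
      GoodA tset nums r ((List.range r).foldl (solveStep nums tset) (PySem.Dict.empty, 0, 0)) := by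
  intro r
  induction r with
  | zero =>
    intro _
    simp only [List.range_zero, List.foldl_nil, GoodA]
    refine ⟨?_, by omega, by omega, ?_⟩
    · rw [winI_nil nums 0 0 (Or.inl le_rfl)]
      exact InvD_empty tset
    · rw [Finset.sum_range_zero]
      decide
  | succ r ih =>
    intro hr
    obtain ⟨h1, h2, h3, h4⟩ := ih (by omega)
    set st := (List.range r).foldl (solveStep nums tset) (PySem.Dict.empty, 0, 0) with hst
    rw [List.range_succ, List.foldl_append, List.foldl_cons, List.foldl_nil, ← hst]
    have hrn : r < nums.length := by omega
    have hpg : PySem.List.pyGet? nums (r : Int) = some nums[r] := by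
      rw [PySem.List.pyGet?_natCast, List.getElem?_eq_getElem hrn]
    have hwin : winI nums st.2.1 (r + 1) = winI nums st.2.1 r ++ [nums[r]] :=
      winI_append nums st.2.1 r h3 hrn
    have hd1 : InvD tset
        (if tset.contains nums[r] then st.1.modify nums[r] 0 (· + 1) else st.1)
        (winI nums st.2.1 (r + 1)) := by
      rw [hwin]
      exact InvD_extend tset st.1 _ nums[r] h1
    have h2' : ∀ l < st.2.1, complW tset nums l (r + 1) := fun l hl =>
      complW_mono_right tset nums l r (r + 1) (by omega) (h2 l hl)
    have hspec := solveShrink_spec nums tset r ht hne hrn (nums.length + 1)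
      (if tset.contains nums[r] then st.1.modify nums[r] 0 (· + 1) else st.1)
      st.2.1 hd1 h2' (by omega) (by omega)
    set p := solveShrink nums tset (nums.length + 1)
      (if tset.contains nums[r] then st.1.modify nums[r] 0 (· + 1) else st.1) st.2.1 with hp
    obtain ⟨hs1, hs2, hs3, hs4⟩ := hspec
    have hcnt : cntA tset nums r = r + 1 - p.2 := cntA_frontier tset nums r p.2 hs2 hs3
    have hterm : ((r : Int) - (p.2 : Int) + 1) = ((cntA tset nums r : Nat) : Int) := by
      rw [hcnt]
      omega
    have hstep : solveStep nums tset st r =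
        (p.1, p.2, PySem.Int.mod (st.2.2 + ((r : Int) - (p.2 : Int) + 1)) 1000000007) := by
      simp only [solveStep, hpg, ← hp]
    rw [hstep]
    refine ⟨hs1, hs2, hs4, ?_⟩
    rw [h4, hterm, modAdd, Finset.sum_range_succ]
    push_cast
    ring_nf

theorem solve_eq_sum (nums target : List Int) (h : target ≠ []) :
    solve nums target =
      PySem.Int.mod ((∑ r ∈ Finset.range nums.length, cntA (PySem.Set.ofList target) nums r : Nat) : Int)
        1000000007 := by
  have hie : target.isEmpty = false := by
    cases target with
    | nil => exact absurd rfl h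
    | cons a t => rfl
  have hnd : (PySem.Set.ofList target).Nodup := PySem.Set.nodup_ofList target
  have hne : (PySem.Set.ofList target : List Int) ≠ [] := by
    cases target with
    | nil => exact absurd rfl h
    | cons a t =>
      intro hnil
      have : a ∈ PySem.Set.ofList (a :: t) :=
        (PySem.Set.mem_ofList (a :: t) a).2 List.mem_cons_self
      rw [hnil] at this
      exact List.not_mem_nil this
  have hg := foldA_good nums (PySem.Set.ofList target) hnd hne nums.length le_rfl
  simp only [solve, hie, Bool.false_eq_true, ite_false]
  exact hg.2.2.2

-- B's inner loop counts the incomplete windows with start i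
theorem solveAltInner_spec (nums tset : List Int) (i : Nat) (ht : tset.Nodup) (_hi : i ≤ nums.length) :
    ∀ (j : Nat) (seen : PySem.Set Int) (res : Int), i ≤ j → j ≤ nums.length →
      seen.Nodup → (∀ x : Int, x ∈ seen ↔ x ∈ tset ∧ x ∈ winI nums i j) →
      ¬ complW tset nums i j →
      solveAltInner tset (nums.drop j) seen res =
        res + ((List.range (nums.length - j)).countP
          (fun t => !decide (complW tset nums i (j + t + 1))) : Nat) := by
  suffices H : ∀ (m j : Nat) (seen : PySem.Set Int) (res : Int),
      nums.length - j = m → i ≤ j → j ≤ nums.length →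
      seen.Nodup → (∀ x : Int, x ∈ seen ↔ x ∈ tset ∧ x ∈ winI nums i j) →
      ¬ complW tset nums i j →
      solveAltInner tset (nums.drop j) seen res =
        res + ((List.range (nums.length - j)).countP
          (fun t => !decide (complW tset nums i (j + t + 1))) : Nat) by
    intro j seen res h1 h2 h3 h4 h5
    exact H (nums.length - j) j seen res rfl h1 h2 h3 h4 h5
  intro m
  induction m with
  | zero =>
    intro j seen res hm hij hjn hnd hmem hnc
    have hj : j = nums.length := by omega
    have hdrop : nums.drop j = [] := List.drop_eq_nil_of_le (by omega)
    rw [hdrop, hm]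
    simp [solveAltInner]
  | succ m ih =>
    intro j seen res hm hij hjn hnd hmem hnc
    have hjn' : j < nums.length := by omega
    have hdrop : nums.drop j = nums[j] :: nums.drop (j + 1) :=
      List.drop_eq_getElem_cons hjn'
    rw [hdrop]
    have hwin : winI nums i (j + 1) = winI nums i j ++ [nums[j]] :=
      winI_append nums i j hij hjn'
    have hnd' : (if PySem.Set.contains tset nums[j] then seen.add nums[j] else seen).Nodup := by
      by_cases hx : PySem.Set.contains tset nums[j]
      · rw [if_pos hx]
        exact PySem.Set.nodup_add seen nums[j] hnd
      · rw [if_neg hx]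
        exact hnd
    have hmem' : ∀ x : Int, x ∈ (if PySem.Set.contains tset nums[j] then seen.add nums[j] else seen) ↔
        x ∈ tset ∧ x ∈ winI nums i (j + 1) := by
      intro x
      rw [hwin]
      by_cases hx : PySem.Set.contains tset nums[j]
      · have hxt : nums[j] ∈ tset := by simpa [PySem.Set.contains] using hx
        rw [if_pos hx, PySem.Set.mem_add, hmem x]
        constructor
        · rintro (⟨ha, hb⟩ | hxx)
          · exact ⟨ha, List.mem_append_left _ hb⟩
          · subst hxx
            exact ⟨hxt, List.mem_append_right _ (List.mem_singleton.2 rfl)⟩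
        · rintro ⟨ha, hb⟩
          rcases List.mem_append.1 hb with hb | hb
          · exact Or.inl ⟨ha, hb⟩
          · exact Or.inr (List.mem_singleton.1 hb)
      · have hxt : nums[j] ∉ tset := by simpa [PySem.Set.contains] using hx
        rw [if_neg hx, hmem x]
        constructor
        · rintro ⟨ha, hb⟩
          exact ⟨ha, List.mem_append_left _ hb⟩
        · rintro ⟨ha, hb⟩
          rcases List.mem_append.1 hb with hb | hb
          · exact ⟨ha, hb⟩
          · exact absurd ha (by rw [List.mem_singleton.1 hb]; exact hxt)
    have hsub' : ∀ x ∈ (if PySem.Set.contains tset nums[j] then seen.add nums[j] else seen), x ∈ tset :=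
      fun x hx => ((hmem' x).1 hx).1
    have hlen : ((if PySem.Set.contains tset nums[j] then seen.add nums[j] else seen).length = tset.length)
        ↔ complW tset nums i (j + 1) := by
      rw [nodup_len_eq_iff _ tset hnd' ht hsub']
      constructor
      · intro hall y hy
        exact ((hmem' y).1 (hall y hy)).2
      · intro hc y hy
        exact (hmem' y).2 ⟨hy, hc y hy⟩
    rw [solveAltInner]
    by_cases hbr : (if PySem.Set.contains tset nums[j] then seen.add nums[j] else seen).length = tset.length
    · rw [if_pos hbr]
      have hcall : complW tset nums i (j + 1) := hlen.1 hbr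
      have hzero : (List.range (nums.length - j)).countP
          (fun t => !decide (complW tset nums i (j + t + 1))) = 0 := by
        rw [List.countP_eq_zero]
        intro t _
        simp only [Bool.not_eq_eq_eq_not, Bool.not_true, decide_eq_false_iff_not, not_not]
        exact complW_mono_right tset nums i (j + 1) (j + t + 1) (by omega) hcall
      rw [hzero]
      simp
    · rw [if_neg hbr]
      have hnc' : ¬ complW tset nums i (j + 1) := fun hc => hbr (hlen.2 hc)
      rw [ih (j + 1) _ (res + 1) (by omega) (by omega) (by omega) hnd' hmem' hnc']
      have hsplit : (List.range (nums.length - j)).countP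
          (fun t => !decide (complW tset nums i (j + t + 1))) =
          1 + (List.range (nums.length - (j + 1))).countP
            (fun t => !decide (complW tset nums i (j + 1 + t + 1))) := by
        have hmm : nums.length - j = (nums.length - (j + 1)) + 1 := by omega
        rw [hmm, List.range_succ_eq_map, List.countP_cons, List.countP_map]
        have hzero : (!decide (complW tset nums i (j + 0 + 1))) = true := by
          simpa using hnc'
        rw [hzero]
        have hfun : ((fun t => !decide (complW tset nums i (j + t + 1))) ∘ Nat.succ) =
            (fun t => !decide (complW tset nums i (j + 1 + t + 1))) := by
          funext t
          simp only [Function.comp_apply]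
          rw [show j + Nat.succ t + 1 = j + 1 + t + 1 from by omega]
        rw [hfun]
        simp only [if_true]
        omega
      rw [hsplit]
      push_cast
      ring

theorem solve_alt_eq_sum (nums target : List Int) (h : target ≠ []) :
    solve_alt nums target =
      PySem.Int.mod ((∑ i ∈ Finset.range nums.length, cntB (PySem.Set.ofList target) nums i : Nat) : Int)
        1000000007 := by
  have hie : target.isEmpty = false := by
    cases target with
    | nil => exact absurd rfl h
    | cons a t => rfl
  have hnd : (PySem.Set.ofList target).Nodup := PySem.Set.nodup_ofList target
  have hne : (PySem.Set.ofList target : List Int) ≠ [] := by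
    cases target with
    | nil => exact absurd rfl h
    | cons a t =>
      intro hnil
      have : a ∈ PySem.Set.ofList (a :: t) :=
        (PySem.Set.mem_ofList (a :: t) a).2 List.mem_cons_self
      rw [hnil] at this
      exact List.not_mem_nil this
  have hfold : ∀ k, k ≤ nums.length →
      (List.range k).foldl
        (fun res i => solveAltInner (PySem.Set.ofList target) (nums.drop i) PySem.Set.empty res) 0 =
      ((∑ i ∈ Finset.range k, cntB (PySem.Set.ofList target) nums i : Nat) : Int) := by
    intro k
    induction k with
    | zero => intro _; simp
    | succ k ih =>
      intro hk
      rw [List.range_succ, List.foldl_append, List.foldl_cons, List.foldl_nil, ih (by omega)]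
      have hmemE : ∀ x : Int, x ∈ (PySem.Set.empty : PySem.Set Int) ↔
          x ∈ PySem.Set.ofList target ∧ x ∈ winI nums k k := by
        intro x
        constructor
        · intro hx
          exact absurd hx List.not_mem_nil
        · rintro ⟨_, hx⟩
          rw [winI_nil nums k k (Or.inl le_rfl)] at hx
          exact absurd hx List.not_mem_nil
      have hncE : ¬ complW (PySem.Set.ofList target) nums k k :=
        not_complW_nil (PySem.Set.ofList target) nums k k hne (Or.inl le_rfl)
      rw [solveAltInner_spec nums (PySem.Set.ofList target) k hnd (by omega) k PySem.Set.empty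
        ((∑ i ∈ Finset.range k, cntB (PySem.Set.ofList target) nums i : Nat) : Int)
        le_rfl (by omega) List.nodup_nil hmemE hncE]
      rw [Finset.sum_range_succ]
      unfold cntB
      push_cast
      ring
  simp only [solve_alt, hie, Bool.false_eq_true, ite_false]
  rw [hfold nums.length le_rfl]

theorem countP_range_eq_sum (k : Nat) (p : Nat → Bool) :
    (List.range k).countP p = ∑ x ∈ Finset.range k, (if p x then 1 else 0) := by
  induction k with
  | zero => simp
  | succ k ih =>
    rw [List.range_succ, List.countP_append, Finset.sum_range_succ, ih, List.countP_cons]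
    simp [List.countP_nil]

-- double counting: summing per right end equals summing per left end
theorem sum_cntA_eq_sum_cntB (tset nums : List Int) :
    ∑ r ∈ Finset.range nums.length, cntA tset nums r =
    ∑ i ∈ Finset.range nums.length, cntB tset nums i := by
  have hA : ∀ r ∈ Finset.range nums.length, cntA tset nums r =
      ∑ l ∈ Finset.range nums.length,
        (if l ≤ r ∧ ¬ complW tset nums l (r + 1) then 1 else 0) := by
    intro r hr
    rw [Finset.mem_range] at hr
    unfold cntA
    rw [countP_range_eq_sum,
      show Finset.range (r + 1) = (Finset.range nums.length).filter (fun l => l ≤ r) by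
        ext a
        simp only [Finset.mem_filter, Finset.mem_range]
        omega,
      Finset.sum_filter]
    apply Finset.sum_congr rfl
    intro l _
    by_cases h1 : l ≤ r <;> by_cases h2 : complW tset nums l (r + 1) <;> simp [h1, h2]
  have hB : ∀ i ∈ Finset.range nums.length, cntB tset nums i =
      ∑ r ∈ Finset.range nums.length,
        (if i ≤ r ∧ ¬ complW tset nums i (r + 1) then 1 else 0) := by
    intro i hi
    rw [Finset.mem_range] at hi
    unfold cntB
    rw [countP_range_eq_sum]
    have h1 : ∑ r ∈ Finset.range nums.length,
        (if i ≤ r ∧ ¬ complW tset nums i (r + 1) then 1 else 0) =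
        ∑ r ∈ Finset.Ico i nums.length, (if ¬ complW tset nums i (r + 1) then 1 else 0) := by
      rw [show Finset.Ico i nums.length = (Finset.range nums.length).filter (fun r => i ≤ r) by
          ext a
          simp only [Finset.mem_filter, Finset.mem_range, Finset.mem_Ico]
          omega,
        Finset.sum_filter]
      apply Finset.sum_congr rfl
      intro r _
      by_cases h1 : i ≤ r <;> by_cases h2 : complW tset nums i (r + 1) <;> simp [h1, h2]
    rw [h1, Finset.sum_Ico_eq_sum_range]
    apply Finset.sum_congr rfl
    intro t _
    by_cases h2 : complW tset nums i (i + t + 1) <;> simp [h2]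
  rw [Finset.sum_congr rfl hA, Finset.sum_congr rfl hB, Finset.sum_comm]

-- ===== VERDICT (by name: the statement is the Claim_ definition above) =====
theorem solve_spec : Claim_equal_solve := by
  intro nums target _
  unfold Spec_solve
  by_cases h : target = []
  · subst h; rfl
  · rw [solve_eq_sum nums target h, solve_alt_eq_sum nums target h,
      sum_cntA_eq_sum_cntB]
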